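-- pv_equiv track=rewrite | github.com/enricobottazzi/tomaquet-ecc | ecc.py | successive_squares
-- ===== SOURCE A (Python) =====
-- def successive_squares(base: int, mod: int, length: int):
--     table = [base % mod]
--     prev = base % mod
--     for n in range(1, length):
--         squared = prev**2 % mod
--         table.append(squared)
--         prev = squared
--     return table
-- ===== SOURCE B (Python) =====
-- def successive_squares(base: int, mod: int, length: int):
--     # The squaring map x -> x*x % mod on canonical residues is deterministic, so the
--     # sequence becomes periodic as soon as a value repeats.  Record the first
--     # occurrence of each value in a dict; once a repeat is seen, stop squaring and
--     # fill the rest of the table by copying the entry one period back.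
--     first = base % mod
--     seq = [first]
--     index = {first: 0}
--     cur = first
--     while len(seq) < length:
--         cur = cur * cur % mod
--         if cur in index:
--             p = len(seq) - index[cur]
--             while len(seq) < length:
--                 seq.append(seq[len(seq) - p])
--             break
--         index[cur] = len(seq)
--         seq.append(cur)
--     return seq
-- ===== Notes on version B (the rewrite author's own statement) =====
-- stated objective: alternative
-- what changed: Instead of chaining every entry from the previous square for all `length` steps, B records the first occurrence of each residue in a dict, stops squaring at the first repeat, and fills the remaining entries from the detected period (seq[i - p]); Pre_ excludes mod == 0, where both programs raise ZeroDivisionError.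
import Mathlib
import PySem

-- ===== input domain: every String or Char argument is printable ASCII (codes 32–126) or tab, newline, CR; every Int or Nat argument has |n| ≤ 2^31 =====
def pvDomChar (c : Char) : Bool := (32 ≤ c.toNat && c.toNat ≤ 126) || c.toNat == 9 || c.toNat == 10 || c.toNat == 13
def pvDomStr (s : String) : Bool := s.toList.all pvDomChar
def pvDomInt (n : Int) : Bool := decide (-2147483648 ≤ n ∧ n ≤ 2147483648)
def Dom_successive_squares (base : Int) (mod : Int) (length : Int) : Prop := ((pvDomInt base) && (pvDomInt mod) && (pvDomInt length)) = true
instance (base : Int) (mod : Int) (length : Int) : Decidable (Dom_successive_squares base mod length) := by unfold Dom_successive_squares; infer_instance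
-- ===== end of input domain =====

-- B detects the cycle of the squaring map with a first-occurrence dict and fills the
-- rest of the table from the detected period instead of squaring step by step;
-- Pre_ excludes mod = 0, where both A and B raise ZeroDivisionError.


-- ===== PORT A =====
-- table = [base % mod]; prev = base % mod; for n in range(1, length): squared = prev**2 % mod; append; prev = squared
def successive_squares (base : Int) (mod : Int) (length : Int) : List Int :=
  let r0 := PySem.Int.mod base mod
  ((PySem.List.pyRange 1 length 1).foldl
    (fun (st : List Int × Int) _n =>
      let squared := PySem.Int.mod (st.2 ^ 2) mod
      (st.1 ++ [squared], squared))
    ([r0], r0)).1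

-- ===== PORT B =====
-- inner while loop: while len(seq) < length: seq.append(seq[len(seq) - p]).
-- The index len(seq) - p is a plain in-range nonnegative index on every reachable call
-- (1 ≤ p ≤ len(seq)), so List.getD with default 0 is exact there.
def sqFill (p : Int) (total : Int) (seq : List Int) : List Int :=
  if _h : (seq.length : Int) < total then
    sqFill p total (seq ++ [seq.getD (seq.length - p.toNat) 0])
  else seq
termination_by (total - seq.length).toNat
decreasing_by simp; omega

-- outer while loop: square cur, on a repeat compute the period p and fill, otherwise
-- record the first occurrence and append
def sqLoop (m : Int) (total : Int) (seq : List Int) (index : PySem.Dict Int Int) (cur : Int) : List Int :=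
  if _h : (seq.length : Int) < total then
    let cur' := PySem.Int.mod (cur * cur) m
    match index.get? cur' with
    | some s => sqFill ((seq.length : Int) - s) total seq
    | none => sqLoop m total (seq ++ [cur']) (index.insert cur' (seq.length : Int)) cur'
  else seq
termination_by (total - seq.length).toNat
decreasing_by simp; omega

-- first = base % mod; seq = [first]; index = {first: 0}; cur = first; <outer while>; return seq
def successive_squares_alt (base : Int) (mod : Int) (length : Int) : List Int :=
  let first := PySem.Int.mod base mod
  sqLoop mod length [first] (PySem.Dict.empty.insert first 0) first

-- ===== PRECONDITION & SPEC =====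
-- Pre_ excludes mod = 0: A raises ZeroDivisionError there (base % 0), and so does B.
def Pre_successive_squares (base : Int) (mod : Int) (length : Int) : Prop := mod ≠ 0
instance (base : Int) (mod : Int) (length : Int) : Decidable (Pre_successive_squares base mod length) := by unfold Pre_successive_squares; infer_instance
def pvWitness_successive_squares : Int × Int × Int := (3, 7, 4)

def Spec_successive_squares (base : Int) (mod : Int) (length : Int) (out : List Int) : Prop := out = successive_squares_alt base mod length
instance (base : Int) (mod : Int) (length : Int) (out : List Int) : Decidable (Spec_successive_squares base mod length out) := by unfold Spec_successive_squares; infer_instance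

-- ===== CLAIM (what is proved, stated in full; the proofs are below) =====
def Claim_equal_successive_squares : Prop := ∀ (base : Int) (mod : Int) (length : Int), Dom_successive_squares base mod length → Pre_successive_squares base mod length → Spec_successive_squares base mod length (successive_squares base mod length)

-- ===== LEMMAS AND PROOFS =====

-- the i-th iterate of the squaring map starting from base % m
def pvIt (base m : Int) (i : Nat) : Int :=
  (fun x => PySem.Int.mod (x * x) m)^[i] (PySem.Int.mod base m)

theorem pvIt_zero (base m : Int) : pvIt base m 0 = PySem.Int.mod base m := rfl

theorem pvIt_succ (base m : Int) (i : Nat) :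
    pvIt base m (i + 1) = PySem.Int.mod (pvIt base m i * pvIt base m i) m := by
  unfold pvIt
  rw [Function.iterate_succ_apply']

-- once one repeat pvIt (s + p) = pvIt s is seen, the sequence is p-periodic from s on
theorem pvIt_period (base m : Int) (s p : Nat)
    (hp : pvIt base m (s + p) = pvIt base m s) :
    ∀ j, s ≤ j → pvIt base m (j + p) = pvIt base m j := by
  have pvIt_add : ∀ a b : Nat, pvIt base m (a + b)
      = (fun x => PySem.Int.mod (x * x) m)^[a] (pvIt base m b) := by
    intro a b; unfold pvIt; rw [Function.iterate_add_apply]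
  intro j hj
  obtain ⟨t, rfl⟩ := Nat.exists_eq_add_of_le hj
  rw [show s + t + p = t + (s + p) by omega, pvIt_add, hp, ← pvIt_add,
    show t + s = s + t by omega]

-- A's loop state after j iterations: table = first j+1 iterates, prev = the j-th
theorem a_inv (base m : Int) (j : Nat) :
    ((PySem.List.pyRange 1 (1 + (j : Int)) 1).foldl
      (fun (st : List Int × Int) _n =>
        let squared := PySem.Int.mod (st.2 ^ 2) m
        (st.1 ++ [squared], squared))
      ([PySem.Int.mod base m], PySem.Int.mod base m))
    = ((List.range (j + 1)).map (pvIt base m), pvIt base m j) := by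
  induction j with
  | zero =>
      rw [PySem.List.pyRange_one_eq_nil (by norm_num)]
      simp [pvIt_zero]
  | succ j ih =>
      have hsplit : PySem.List.pyRange 1 (1 + ((j : Int) + 1)) 1
          = PySem.List.pyRange 1 (1 + (j : Int)) 1 ++ [1 + (j : Int)] := by
        rw [show (1 : Int) + ((j : Int) + 1) = (1 + (j : Int)) + 1 by ring,
          PySem.List.pyRange_one_succ_right (by omega)]
      push_cast
      rw [hsplit, List.foldl_append, ih]
      simp only [List.foldl]
      rw [show pvIt base m j ^ 2 = pvIt base m j * pvIt base m j by ring, ← pvIt_succ,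
        List.range_succ (n := j + 1), List.map_append]
      simp

-- A returns the first max 1 length.toNat iterates
theorem a_char (base m len : Int) :
    successive_squares base m len = (List.range (max 1 len.toNat)).map (pvIt base m) := by
  unfold successive_squares
  by_cases hlen : len ≤ 1
  · rw [PySem.List.pyRange_one_eq_nil hlen]
    have : max 1 len.toNat = 1 := by omega
    simp [this, pvIt_zero]
  · have hrep : len = 1 + ((len - 1).toNat : Int) := by omega
    have hmax : max 1 len.toNat = (len - 1).toNat + 1 := by omega
    rw [hmax]
    conv_lhs => rw [hrep]
    simpa using congrArg Prod.fst (a_inv base m (len - 1).toNat)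

-- the fill loop extends the table of iterates to the requested size using periodicity
theorem fill_char (base m total : Int) :
    ∀ (fuel k p : Nat), total.toNat - k = fuel → 1 ≤ p → p ≤ k →
    (∀ i, k ≤ i → pvIt base m i = pvIt base m (i - p)) →
    sqFill (p : Int) total ((List.range k).map (pvIt base m))
      = (List.range (max k total.toNat)).map (pvIt base m) := by
  intro fuel
  induction fuel with
  | zero =>
      intro k p hfuel _ _ _
      rw [sqFill]
      have hc : ¬ (((((List.range k).map (pvIt base m)).length : Int)) < total) := by
        simp only [List.length_map, List.length_range]; omega
      rw [dif_neg hc, Nat.max_eq_left (by omega)]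
  | succ fuel ih =>
      intro k p hfuel hp1 hpk hper
      rw [sqFill]
      have hc : ((((List.range k).map (pvIt base m)).length : Int)) < total := by
        simp only [List.length_map, List.length_range]; omega
      rw [dif_pos hc]
      have hidx : ((List.range k).map (pvIt base m)).getD
          (((List.range k).map (pvIt base m)).length - (p : Int).toNat) 0
          = pvIt base m (k - p) := by
        simp only [List.length_map, List.length_range, Int.toNat_natCast]
        rw [List.getD_eq_getElem?_getD]
        simp [List.getElem?_range (by omega : k - p < k)]
      rw [hidx, ← hper k le_rfl]
      have hnext : (List.range k).map (pvIt base m) ++ [pvIt base m k]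
          = (List.range (k + 1)).map (pvIt base m) := by
        simp [List.range_succ]
      rw [hnext]
      rw [ih (k + 1) p (by omega) hp1 (by omega) (fun i hi => hper i (by omega))]
      rw [Nat.max_eq_right (by omega), Nat.max_eq_right (by omega)]

-- invariant of the first-occurrence dict: every stored index is the position of an
-- earlier equal iterate
def pvIdxInv (base m : Int) (index : PySem.Dict Int Int) (k : Nat) : Prop :=
  ∀ v s, index.get? v = some s → ∃ n : Nat, s = (n : Int) ∧ n < k ∧ pvIt base m n = v

-- the outer loop produces the table of iterates
theorem loop_char (base m total : Int) :
    ∀ (fuel k : Nat) (index : PySem.Dict Int Int), total.toNat - k = fuel → 1 ≤ k →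
    pvIdxInv base m index k →
    sqLoop m total ((List.range k).map (pvIt base m)) index (pvIt base m (k - 1))
      = (List.range (max k total.toNat)).map (pvIt base m) := by
  intro fuel
  induction fuel with
  | zero =>
      intro k index hfuel hk _
      rw [sqLoop]
      have hc : ¬ (((((List.range k).map (pvIt base m)).length : Int)) < total) := by
        simp only [List.length_map, List.length_range]; omega
      rw [dif_neg hc, Nat.max_eq_left (by omega)]
  | succ fuel ih =>
      intro k index hfuel hk hinv
      rw [sqLoop]
      have hc : ((((List.range k).map (pvIt base m)).length : Int)) < total := by
        simp only [List.length_map, List.length_range]; omega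
      rw [dif_pos hc]
      have hcur : PySem.Int.mod (pvIt base m (k - 1) * pvIt base m (k - 1)) m
          = pvIt base m k := by
        rw [← pvIt_succ, show k - 1 + 1 = k by omega]
      show (match index.get? (PySem.Int.mod (pvIt base m (k - 1) * pvIt base m (k - 1)) m) with
        | some s => sqFill ((((List.range k).map (pvIt base m)).length : Int) - s) total
            ((List.range k).map (pvIt base m))
        | none => sqLoop m total
            ((List.range k).map (pvIt base m)
              ++ [PySem.Int.mod (pvIt base m (k - 1) * pvIt base m (k - 1)) m])
            (index.insert (PySem.Int.mod (pvIt base m (k - 1) * pvIt base m (k - 1)) m)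
              (((List.range k).map (pvIt base m)).length : Int))
            (PySem.Int.mod (pvIt base m (k - 1) * pvIt base m (k - 1)) m))
        = (List.range (max k total.toNat)).map (pvIt base m)
      rw [hcur]
      cases hget : index.get? (pvIt base m k) with
      | some s =>
          obtain ⟨n, rfl, hnk, hval⟩ := hinv _ _ hget
          simp only [List.length_map, List.length_range]
          have hcast : ((k : Int) - (n : Int)) = ((k - n : Nat) : Int) := by omega
          rw [hcast]
          have hper : ∀ i, k ≤ i → pvIt base m i = pvIt base m (i - (k - n)) := by
            intro i hi
            have hrep : pvIt base m (n + (k - n)) = pvIt base m n := by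
              rw [show n + (k - n) = k by omega]; exact hval.symm ▸ hval ▸ hval.symm
            have := pvIt_period base m n (k - n) hrep (i - (k - n)) (by omega)
            rw [show i - (k - n) + (k - n) = i by omega] at this
            exact this
          exact fill_char base m total (fuel + 1) k (k - n) hfuel (by omega) (by omega) hper
      | none =>
          have hnext : (List.range k).map (pvIt base m) ++ [pvIt base m k]
              = (List.range (k + 1)).map (pvIt base m) := by
            simp [List.range_succ]
          simp only [List.length_map, List.length_range, hnext]
          have hinv' : pvIdxInv base m (index.insert (pvIt base m k) (k : Int)) (k + 1) := by
            intro v s hvs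
            by_cases hv : v = pvIt base m k
            · subst hv
              rw [PySem.Dict.get?_insert_self] at hvs
              exact ⟨k, (Option.some.inj hvs).symm, by omega, rfl⟩
            · rw [PySem.Dict.get?_insert_of_ne _ _ hv] at hvs
              obtain ⟨n, rfl, hnk, hval⟩ := hinv _ _ hvs
              exact ⟨n, rfl, by omega, hval⟩
          have := ih (k + 1) (index.insert (pvIt base m k) (k : Int)) (by omega)
            (by omega) hinv'
          rw [show k + 1 - 1 = k by omega] at this
          rw [this, Nat.max_eq_right (by omega), Nat.max_eq_right (by omega)]

theorem b_char (base m len : Int) :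
    successive_squares_alt base m len = (List.range (max 1 len.toNat)).map (pvIt base m) := by
  unfold successive_squares_alt
  have h1 : [PySem.Int.mod base m] = (List.range 1).map (pvIt base m) := by
    simp [pvIt_zero]
  have h0 : PySem.Int.mod base m = pvIt base m (1 - 1) := (pvIt_zero base m).symm
  have hinv : pvIdxInv base m (PySem.Dict.empty.insert (PySem.Int.mod base m) 0) 1 := by
    intro v s hvs
    by_cases hv : v = PySem.Int.mod base m
    · subst hv
      rw [PySem.Dict.get?_insert_self] at hvs
      exact ⟨0, (Option.some.inj hvs).symm, by omega, pvIt_zero base m⟩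
    · rw [PySem.Dict.get?_insert_of_ne _ _ hv, PySem.Dict.get?_empty] at hvs
      exact absurd hvs (by simp)
  show sqLoop m len [PySem.Int.mod base m]
      (PySem.Dict.empty.insert (PySem.Int.mod base m) 0) (PySem.Int.mod base m)
      = List.map (pvIt base m) (List.range (max 1 len.toNat))
  rw [h1, h0]
  exact loop_char base m len (len.toNat - 1) 1 _ (by omega) le_rfl hinv

-- ===== VERDICT (by name: the statement is the Claim_ definition above) =====
theorem successive_squares_spec : Claim_equal_successive_squares := by
  intro base m len _ _
  unfold Spec_successive_squares
  rw [a_char, b_char]
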